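-- pv_equiv track=rewrite | github.com/kootepe/taxatrainer | get_inat_taxa_page.py | extract_taxon_queries
-- ===== SOURCE A (Python) =====
-- from typing import Any, Dict, List, Optional, Tuple
--
-- def norm(s: str) -> str:
--     return " ".join((s or "").strip().split())
--
-- def extract_taxon_queries(tree: Any) -> List[str]:
--     out: List[str] = []
--
--     def add(q: str) -> None:
--         q = norm(q)
--         if q:
--             out.append(q)
--
--     def walk(node: Any) -> None:
--         if isinstance(node, dict):
--             if "specie" in node and isinstance(node["specie"], list):
--                 for sp in node["specie"]:
--                     if not isinstance(sp, dict):
--                         continue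
--                     genus = norm(sp.get("genus", ""))
--                     species = norm(sp.get("species", ""))
--                     if genus:
--                         add(f"{genus} {species}".strip())
--             if node.get("lat"):
--                 add(node["lat"])
--             for v in node.values():
--                 walk(v)
--         elif isinstance(node, list):
--             for item in node:
--                 walk(item)
--
--     walk(tree)
--
--     seen = set()
--     deduped: List[str] = []
--     for q in out:
--         k = q.lower()
--         if k not in seen:
--             seen.add(k)
--             deduped.append(q)
--     return deduped
-- ===== SOURCE B (Python) =====
-- def norm(s):
--     return " ".join((s or "").strip().split())
--
-- def extract_taxon_queries(tree):
--     out = []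
--     seen = set()
--
--     def add(q):
--         q = norm(q)
--         if q:
--             k = q.lower()
--             if k not in seen:
--                 seen.add(k)
--                 out.append(q)
--
--     stack = [tree]
--     while stack:
--         node = stack.pop()
--         if isinstance(node, dict):
--             if "specie" in node and isinstance(node["specie"], list):
--                 for sp in node["specie"]:
--                     if not isinstance(sp, dict):
--                         continue
--                     genus = norm(sp.get("genus", ""))
--                     species = norm(sp.get("species", ""))
--                     if genus:
--                         add(f"{genus} {species}".strip())
--             if node.get("lat"):
--                 add(node["lat"])
--             stack.extend(reversed(list(node.values())))
--         elif isinstance(node, list):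
--             stack.extend(reversed(node))
--     return out
-- ===== Notes on version B (the rewrite author's own statement) =====
-- stated objective: alternative
-- what changed: Replaces the recursive walk plus a separate post-hoc dedup pass by a single iterative explicit-stack traversal (children pushed in reverse to keep pre-order) that deduplicates case-insensitively on the fly while emitting.
import Mathlib
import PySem

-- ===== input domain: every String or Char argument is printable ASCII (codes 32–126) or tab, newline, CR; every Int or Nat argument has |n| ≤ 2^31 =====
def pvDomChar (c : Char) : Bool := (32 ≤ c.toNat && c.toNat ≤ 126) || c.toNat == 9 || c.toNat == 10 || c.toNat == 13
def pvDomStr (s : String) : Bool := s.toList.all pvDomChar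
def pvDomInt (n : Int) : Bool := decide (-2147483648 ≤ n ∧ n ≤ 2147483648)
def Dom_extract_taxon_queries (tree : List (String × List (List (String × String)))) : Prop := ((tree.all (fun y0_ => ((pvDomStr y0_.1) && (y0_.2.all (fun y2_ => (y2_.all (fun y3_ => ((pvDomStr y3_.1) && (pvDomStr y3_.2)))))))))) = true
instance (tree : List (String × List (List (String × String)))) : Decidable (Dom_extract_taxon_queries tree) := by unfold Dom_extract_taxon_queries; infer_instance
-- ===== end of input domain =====

-- B replaces A's recursive walk + separate dedup pass by one iterative explicit-stack traversal
-- that deduplicates case-insensitively while emitting (objective: alternative, same cost).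

-- ===== PORT A =====
-- norm(s) = " ".join((s or "").strip().split())  ('s or ""' is the identity on a str argument)
def pvNorm (s : String) : String :=
  PySem.Str.join " " (PySem.Str.split₀ (PySem.Str.strip s))

-- A's 'add': normalise, append when nonempty
def pvAddA (out : List String) (q : String) : List String :=
  let q := pvNorm q
  if q ≠ "" then out ++ [q] else out

-- walk on an inner dict (its values are strings, so the 'specie' branch's isinstance(…, list) is
-- False there and the recursive walk over its string values does nothing)
def pvWalkInner (out : List String) (d : List (String × String)) : List String :=
  match PySem.Dict.get? (PySem.Dict.ofList d) "lat" with
  | some s => if s ≠ "" then pvAddA out s else out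
  | none => out

def extract_taxon_queries (tree : List (String × List (List (String × String)))) : List String :=
  -- walk(tree): the top node is a dict whose values are lists of inner dicts
  let d := PySem.Dict.ofList tree
  let out : List String := []
  let out :=
    match PySem.Dict.get? d "specie" with
    | some sps =>
        sps.foldl (fun acc sp =>
          let genus := pvNorm (PySem.Dict.getD (PySem.Dict.ofList sp) "genus" "")
          let species := pvNorm (PySem.Dict.getD (PySem.Dict.ofList sp) "species" "")
          if genus ≠ "" then pvAddA acc (PySem.Str.strip (genus ++ " " ++ species)) else acc) out
    | none => out
  -- node.get("lat") at the top level is a LIST: nonempty → the Python raises AttributeError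
  -- inside norm (excluded by Pre_); empty → falsy. Admitted inputs emit nothing here.
  let out :=
    (PySem.Dict.values d).foldl (fun acc v => v.foldl pvWalkInner acc) out
  -- the final case-insensitive first-occurrence dedup loop
  (out.foldl (fun (st : PySem.Set String × List String) q =>
      let k := PySem.Str.lower q
      if PySem.Set.contains st.1 k then st else (PySem.Set.add st.1 k, st.2 ++ [q]))
    (PySem.Set.empty, [])).2

-- ===== PORT B =====
-- stack entries: the four runtime shapes B's generic walk meets on this input type
inductive PVNode where
  | top : List (String × List (List (String × String))) → PVNode
  | lst : List (List (String × String)) → PVNode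
  | inn : List (String × String) → PVNode
  | str : String → PVNode
deriving DecidableEq, Repr

def pvNodeSize : PVNode → Nat
  | .str _ => 1
  | .inn d => 1 + (PySem.Dict.values (PySem.Dict.ofList d)).length
  | .lst l => 1 + (l.map (fun d => 1 + (PySem.Dict.values (PySem.Dict.ofList d)).length)).sum
  | .top t => 1 + ((PySem.Dict.values (PySem.Dict.ofList t)).map
      (fun v => 1 + (v.map (fun d => 1 + (PySem.Dict.values (PySem.Dict.ofList d)).length)).sum)).sum

-- B's 'add': normalise, emit only when the lowercased key is new
def pvAddB (st : PySem.Set String × List String) (q : String) : PySem.Set String × List String :=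
  let q := pvNorm q
  if q ≠ "" then
    let k := PySem.Str.lower q
    if PySem.Set.contains st.1 k then st else (PySem.Set.add st.1 k, st.2 ++ [q])
  else st

-- B's while-loop over the explicit stack.  Python appends reversed(children) to a list popped
-- from its end; with a head-top list stack that is exactly 'children (in order) ++ rest'.
def pvLoopB : List PVNode → PySem.Set String → List String → List String
  | [], _, acc => acc
  | .str _ :: rest, seen, acc => pvLoopB rest seen acc
  | .inn d :: rest, seen, acc =>
      -- inner dict: 'specie' value is a String (isinstance list fails); emit its lat, push its string values
      let st :=
        match PySem.Dict.get? (PySem.Dict.ofList d) "lat" with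
        | some s => if s ≠ "" then pvAddB (seen, acc) s else (seen, acc)
        | none => (seen, acc)
      pvLoopB ((PySem.Dict.values (PySem.Dict.ofList d)).map PVNode.str ++ rest) st.1 st.2
  | .lst l :: rest, seen, acc => pvLoopB (l.map PVNode.inn ++ rest) seen acc
  | .top t :: rest, seen, acc =>
      let st :=
        match PySem.Dict.get? (PySem.Dict.ofList t) "specie" with
        | some sps =>
            sps.foldl (fun st sp =>
              let genus := pvNorm (PySem.Dict.getD (PySem.Dict.ofList sp) "genus" "")
              let species := pvNorm (PySem.Dict.getD (PySem.Dict.ofList sp) "species" "")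
              if genus ≠ "" then pvAddB st (PySem.Str.strip (genus ++ " " ++ species)) else st)
              (seen, acc)
        | none => (seen, acc)
      -- top-level lat is a list: nonempty raises in Python (excluded by Pre_), empty emits nothing
      pvLoopB ((PySem.Dict.values (PySem.Dict.ofList t)).map PVNode.lst ++ rest) st.1 st.2
termination_by stack _ _ => (stack.map pvNodeSize).sum
decreasing_by
  · simp [pvNodeSize]
  · simp [pvNodeSize, List.map_map, Function.comp_def]
  · simp [pvNodeSize, List.map_map, Function.comp_def]
  · simp [pvNodeSize, List.map_map, Function.comp_def]

def extract_taxon_queries_alt (tree : List (String × List (List (String × String)))) : List String :=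
  pvLoopB [PVNode.top tree] PySem.Set.empty []

-- ===== PRECONDITION & SPEC =====
-- Pre_ excludes only the inputs on which the Python A (and B alike) RAISES: a top-level "lat"
-- entry whose value — a nonempty list in this schema — is truthy, so A calls norm(list) and
-- raises AttributeError ('list' object has no attribute 'strip').
def Pre_extract_taxon_queries (tree : List (String × List (List (String × String)))) : Prop :=
  PySem.Dict.getD (PySem.Dict.ofList tree) "lat" [] = []
instance (tree : List (String × List (List (String × String)))) : Decidable (Pre_extract_taxon_queries tree) := by unfold Pre_extract_taxon_queries; infer_instance

def pvWitness_extract_taxon_queries : (List (String × List (List (String × String)))) :=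
  [("specie", [[("genus", "Abies"), ("species", "alba")], [("lat", "Picea  abies")]]),
   ("kids", [[("lat", "picea ABIES")], [("lat", "")]])]

def Spec_extract_taxon_queries (tree : List (String × List (List (String × String)))) (out : List String) : Prop := out = extract_taxon_queries_alt tree
instance (tree : List (String × List (List (String × String)))) (out : List String) : Decidable (Spec_extract_taxon_queries tree out) := by unfold Spec_extract_taxon_queries; infer_instance

-- ===== CLAIM (what is proved, stated in full; the proofs are below) =====
def Claim_equal_extract_taxon_queries : Prop := ∀ (tree : List (String × List (List (String × String)))), Dom_extract_taxon_queries tree → Pre_extract_taxon_queries tree → Spec_extract_taxon_queries tree (extract_taxon_queries tree)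

-- ===== LEMMAS AND PROOFS =====

-- the (normalised, nonempty) queries one raw string contributes
def pvEmit (s : String) : List String :=
  let q := pvNorm s
  if q ≠ "" then [q] else []

def pvSpecieEmits (sps : List (List (String × String))) : List String :=
  sps.flatMap (fun sp =>
    let genus := pvNorm (PySem.Dict.getD (PySem.Dict.ofList sp) "genus" "")
    if genus ≠ "" then
      pvEmit (PySem.Str.strip (genus ++ " " ++ pvNorm (PySem.Dict.getD (PySem.Dict.ofList sp) "species" "")))
    else [])

def pvEmitInner (d : List (String × String)) : List String :=
  match PySem.Dict.get? (PySem.Dict.ofList d) "lat" with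
  | some s => if s ≠ "" then pvEmit s else []
  | none => []

-- full pre-order emission of a node (descendants included)
def pvEmitNode : PVNode → List String
  | .str _ => []
  | .inn d => pvEmitInner d
  | .lst l => l.flatMap pvEmitInner
  | .top t =>
      (match PySem.Dict.get? (PySem.Dict.ofList t) "specie" with
       | some sps => pvSpecieEmits sps
       | none => []) ++
      (PySem.Dict.values (PySem.Dict.ofList t)).flatMap (fun v => v.flatMap pvEmitInner)

-- first-occurrence case-insensitive dedup, as a recursion over the remaining queries
def pvDedupGo (seen : PySem.Set String) : List String → List String
  | [] => []
  | q :: qs =>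
      if PySem.Set.contains seen (PySem.Str.lower q) then pvDedupGo seen qs
      else q :: pvDedupGo (PySem.Set.add seen (PySem.Str.lower q)) qs

theorem pvAddA_emit (out : List String) (q : String) :
    pvAddA out q = out ++ pvEmit q := by
  simp only [pvAddA, pvEmit]
  split <;> simp

theorem pvWalkInner_emit (out : List String) (d : List (String × String)) :
    pvWalkInner out d = out ++ pvEmitInner d := by
  unfold pvWalkInner pvEmitInner
  cases h : PySem.Dict.get? (PySem.Dict.ofList d) "lat" <;> simp [pvAddA_emit]
  split <;> simp

theorem pvInnerFold (v : List (List (String × String))) (acc : List String) :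
    v.foldl pvWalkInner acc = acc ++ v.flatMap pvEmitInner := by
  induction v generalizing acc with
  | nil => simp
  | cons d v ih => simp [pvWalkInner_emit, ih]

theorem pvValuesFold (vs : List (List (List (String × String)))) (acc : List String) :
    vs.foldl (fun acc v => v.foldl pvWalkInner acc) acc
      = acc ++ vs.flatMap (fun v => v.flatMap pvEmitInner) := by
  induction vs generalizing acc with
  | nil => simp
  | cons v vs ih => simp [pvInnerFold, List.flatMap_def]

theorem pvSpFoldA (sps : List (List (String × String))) (acc : List String) :
    sps.foldl (fun acc sp =>
      let genus := pvNorm (PySem.Dict.getD (PySem.Dict.ofList sp) "genus" "")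
      let species := pvNorm (PySem.Dict.getD (PySem.Dict.ofList sp) "species" "")
      if genus ≠ "" then pvAddA acc (PySem.Str.strip (genus ++ " " ++ species)) else acc) acc
    = acc ++ pvSpecieEmits sps := by
  induction sps generalizing acc with
  | nil => simp [pvSpecieEmits]
  | cons sp sps ih =>
      simp only [List.foldl_cons, pvSpecieEmits, List.flatMap_cons]
      by_cases h : pvNorm (PySem.Dict.getD (PySem.Dict.ofList sp) "genus" "") = ""
      · simp only [h, ne_eq, not_true_eq_false, if_false]
        rw [ih]
        simp [pvSpecieEmits]
      · simp only [h, ne_eq, not_false_eq_true, if_true]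
        rw [pvAddA_emit, ih]
        simp [pvSpecieEmits, List.append_assoc]

theorem pvDedupFold (out : List String) (seen : PySem.Set String) (acc : List String) :
    (out.foldl (fun (st : PySem.Set String × List String) q =>
        let k := PySem.Str.lower q
        if PySem.Set.contains st.1 k then st else (PySem.Set.add st.1 k, st.2 ++ [q]))
      (seen, acc)).2 = acc ++ pvDedupGo seen out := by
  induction out generalizing seen acc with
  | nil => simp [pvDedupGo]
  | cons q qs ih =>
      simp only [List.foldl_cons, pvDedupGo]
      by_cases h : PySem.Set.contains seen (PySem.Str.lower q) = true
      · rw [if_pos h, if_pos h, ih]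
      · rw [if_neg h, if_neg h, ih]; simp

theorem pvAddB_dedup (st : PySem.Set String × List String) (s : String) (rest : List String) :
    (pvAddB st s).2 ++ pvDedupGo (pvAddB st s).1 rest
      = st.2 ++ pvDedupGo st.1 (pvEmit s ++ rest) := by
  by_cases h : pvNorm s = ""
  · simp [pvAddB, pvEmit, h]
  · by_cases h2 : PySem.Str.lower (pvNorm s) ∈ st.1
    · simp [pvAddB, pvEmit, h, h2, pvDedupGo]
    · simp [pvAddB, pvEmit, h, h2, pvDedupGo]

theorem pvSpFoldB_dedup (sps : List (List (String × String)))
    (st : PySem.Set String × List String) (rest : List String) :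
    ((sps.foldl (fun st sp =>
        let genus := pvNorm (PySem.Dict.getD (PySem.Dict.ofList sp) "genus" "")
        let species := pvNorm (PySem.Dict.getD (PySem.Dict.ofList sp) "species" "")
        if genus ≠ "" then pvAddB st (PySem.Str.strip (genus ++ " " ++ species)) else st)
      st).2) ++
    pvDedupGo ((sps.foldl (fun st sp =>
        let genus := pvNorm (PySem.Dict.getD (PySem.Dict.ofList sp) "genus" "")
        let species := pvNorm (PySem.Dict.getD (PySem.Dict.ofList sp) "species" "")
        if genus ≠ "" then pvAddB st (PySem.Str.strip (genus ++ " " ++ species)) else st)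
      st).1) rest
      = st.2 ++ pvDedupGo st.1 (pvSpecieEmits sps ++ rest) := by
  induction sps generalizing st with
  | nil => simp [pvSpecieEmits]
  | cons sp sps ih =>
      simp only [List.foldl_cons, pvSpecieEmits, List.flatMap_cons]
      by_cases h : pvNorm (PySem.Dict.getD (PySem.Dict.ofList sp) "genus" "") = ""
      · simp only [h, ne_eq, not_true_eq_false, if_false]
        rw [ih]
        simp [pvSpecieEmits]
      · simp only [h, ne_eq, not_false_eq_true, if_true]
        rw [ih, pvAddB_dedup]
        simp [pvSpecieEmits, List.append_assoc]

theorem pvFlatMap_str (l : List String) :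
    (l.map PVNode.str).flatMap pvEmitNode = [] := by
  induction l with
  | nil => rfl
  | cons s l ih => simp [pvEmitNode, ih]

theorem pvFlatMap_inn (l : List (List (String × String))) :
    (l.map PVNode.inn).flatMap pvEmitNode = l.flatMap pvEmitInner := by
  induction l with
  | nil => rfl
  | cons d l ih => simp [pvEmitNode, ih]

theorem pvFlatMap_lst (vs : List (List (List (String × String)))) :
    (vs.map PVNode.lst).flatMap pvEmitNode
      = vs.flatMap (fun v => v.flatMap pvEmitInner) := by
  induction vs with
  | nil => rfl
  | cons v vs ih =>
      simp only [List.map_cons, List.flatMap_cons, pvEmitNode]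
      rw [ih]

theorem pvLoopB_dedup (stack : List PVNode) (seen : PySem.Set String) (acc : List String) :
    pvLoopB stack seen acc = acc ++ pvDedupGo seen (stack.flatMap pvEmitNode) := by
  induction stack, seen, acc using pvLoopB.induct with
  | case1 seen acc => simp [pvLoopB, pvDedupGo]
  | case2 s rest seen acc ih =>
      simp only [pvLoopB, List.flatMap_cons, pvEmitNode, List.nil_append]
      exact ih
  | case3 d rest seen acc st ih =>
      rw [pvLoopB]
      simp only [st] at ih
      cases hg : PySem.Dict.get? (PySem.Dict.ofList d) "lat" with
      | none =>
          simp only [hg] at ih ⊢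
          rw [ih]
          simp [pvEmitNode, pvEmitInner, hg, List.flatMap_append, pvFlatMap_str]
      | some s =>
          simp only [hg] at ih ⊢
          simp only [dite_eq_ite] at ih
          by_cases hs : s = ""
          · simp only [hs, ne_eq, not_true_eq_false, if_false] at ih ⊢
            rw [ih]
            simp [pvEmitNode, pvEmitInner, hg, hs, List.flatMap_append, pvFlatMap_str]
          · simp only [hs, ne_eq, not_false_eq_true, if_true] at ih ⊢
            rw [ih]
            rw [show ((PySem.Dict.values (PySem.Dict.ofList d)).map PVNode.str ++ rest).flatMap pvEmitNode
                  = rest.flatMap pvEmitNode by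
              simp [List.flatMap_append, pvFlatMap_str]]
            rw [pvAddB_dedup (seen, acc) s (rest.flatMap pvEmitNode)]
            simp [pvEmitNode, pvEmitInner, hg, hs]
  | case4 l rest seen acc ih =>
      rw [pvLoopB]
      simp only [List.map_subtype, List.unattach_attach] at ih
      rw [ih]
      simp [pvEmitNode, List.flatMap_append, pvFlatMap_inn]
  | case5 t rest seen acc st ih =>
      rw [pvLoopB]
      simp only [st] at ih
      cases hg : PySem.Dict.get? (PySem.Dict.ofList t) "specie" with
      | none =>
          simp only [hg] at ih ⊢
          rw [ih]
          simp [pvEmitNode, hg, List.flatMap_append, pvFlatMap_lst]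
      | some sps =>
          simp only [hg] at ih
          simp only [dite_eq_ite] at ih
          rw [ih]
          rw [show ((PySem.Dict.values (PySem.Dict.ofList t)).map PVNode.lst ++ rest).flatMap pvEmitNode
                = (PySem.Dict.values (PySem.Dict.ofList t)).flatMap (fun v => v.flatMap pvEmitInner)
                  ++ rest.flatMap pvEmitNode by
            simp [List.flatMap_append, pvFlatMap_lst]]
          rw [pvSpFoldB_dedup sps (seen, acc)
            ((PySem.Dict.values (PySem.Dict.ofList t)).flatMap (fun v => v.flatMap pvEmitInner)
              ++ rest.flatMap pvEmitNode)]
          simp [pvEmitNode, hg, List.append_assoc]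

theorem pvAlt_eq (tree : List (String × List (List (String × String)))) :
    extract_taxon_queries_alt tree = pvDedupGo PySem.Set.empty (pvEmitNode (.top tree)) := by
  simp [extract_taxon_queries_alt, pvLoopB_dedup]

theorem pvA_eq (tree : List (String × List (List (String × String)))) :
    extract_taxon_queries tree = pvDedupGo PySem.Set.empty (pvEmitNode (.top tree)) := by
  unfold extract_taxon_queries
  rw [pvDedupFold]
  simp only [List.nil_append]
  congr 1
  cases hg : PySem.Dict.get? (PySem.Dict.ofList tree) "specie" with
  | none =>
      rw [pvValuesFold]
      simp [pvEmitNode, hg]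
  | some sps =>
      simp only [hg]
      rw [pvSpFoldA, pvValuesFold]
      simp [pvEmitNode, hg]

-- ===== VERDICT (by name: the statement is the Claim_ definition above) =====
theorem extract_taxon_queries_spec : Claim_equal_extract_taxon_queries := by
  intro tree _ _
  unfold Spec_extract_taxon_queries
  rw [pvA_eq, pvAlt_eq]
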